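-- pv_equiv track=rewrite | github.com/PascalGuenther/adventOfCode_2023 | python/2023_02.py | part2
-- ===== SOURCE A (Python) =====
-- def part2(games):
--     def calculate_power(hands):
--         max_cubes = {}
--         for hand in hands:
--             for color, quantity in hand.items():
--                 defaultQuantity = 0
--                 prev = max_cubes.get(color, defaultQuantity)
--                 max_cubes[color] = max(prev, quantity)
--         power = 1
--         for quantity in max_cubes.values():
--             power *= quantity
--         return power
--     powerSum = 0
--     for hands in games.values():
--         powerSum += calculate_power(hands)
--     return powerSum
-- ===== SOURCE B (Python) =====
-- def part2(games):
--     total = 0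
--     for hands in games.values():
--         colors = []
--         for hand in hands:
--             for c in hand:
--                 if c not in colors:
--                     colors.append(c)
--         power = 1
--         for c in colors:
--             need = 0
--             for hand in hands:
--                 need = max(need, hand.get(c, 0))
--             power *= need
--         total += power
--     return total
-- ===== Notes on version B (the rewrite author's own statement) =====
-- stated objective: alternative
-- what changed: B replaces A's single accumulating pass that maintains a running-max dict with a collect-then-scan decomposition: it first gathers the distinct colors across all hands, then computes each color's requirement by a per-color scan over the hands and multiplies these into the power directly, never building a dict.
import Mathlib
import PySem

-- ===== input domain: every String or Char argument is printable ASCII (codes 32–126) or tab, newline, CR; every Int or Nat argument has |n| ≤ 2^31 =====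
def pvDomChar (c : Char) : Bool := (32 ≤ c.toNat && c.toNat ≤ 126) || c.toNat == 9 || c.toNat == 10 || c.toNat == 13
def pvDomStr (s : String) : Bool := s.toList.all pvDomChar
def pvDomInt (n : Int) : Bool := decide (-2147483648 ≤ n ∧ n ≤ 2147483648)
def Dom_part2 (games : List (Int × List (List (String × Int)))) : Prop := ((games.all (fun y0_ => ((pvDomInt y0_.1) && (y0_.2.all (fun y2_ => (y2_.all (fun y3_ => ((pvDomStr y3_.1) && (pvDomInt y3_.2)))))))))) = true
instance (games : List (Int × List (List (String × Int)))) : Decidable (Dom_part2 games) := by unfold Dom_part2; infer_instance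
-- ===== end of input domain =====

-- B changes the decomposition (collect distinct colors, then a per-color max scan, no dict);
-- same cost, not claimed faster.

-- ===== PORT A =====
-- calculate_power: fold over hands maintaining the running-max dict, then multiply its values.
def part2PowerA (hands : List (List (String × Int))) : Int :=
  let max_cubes : PySem.Dict String Int :=
    hands.foldl
      (fun d hand =>
        (PySem.Dict.ofList hand).items.foldl
          (fun d cq => d.insert cq.1 (max (d.getD cq.1 0) cq.2)) d)
      PySem.Dict.empty
  max_cubes.values.foldl (fun p q => p * q) 1

def part2 (games : List (Int × List (List (String × Int)))) : Int :=
  (PySem.Dict.ofList games).values.foldl (fun s hands => s + part2PowerA hands) 0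

-- ===== PORT B =====
-- need: the per-color scan over the hands (the dicts the Python B receives).
def part2NeedB (dhands : List (PySem.Dict String Int)) (c : String) : Int :=
  dhands.foldl (fun m h => max m (h.getD c 0)) 0

def part2PowerB (hands : List (List (String × Int))) : Int :=
  let dhands := hands.map PySem.Dict.ofList
  let colors : List String :=
    dhands.foldl (fun s h => h.keys.foldl (fun s c => PySem.Set.add s c) s) []
  colors.foldl (fun p c => p * part2NeedB dhands c) 1

def part2_alt (games : List (Int × List (List (String × Int)))) : Int :=
  (PySem.Dict.ofList games).values.foldl (fun t hands => t + part2PowerB hands) 0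

-- ===== PRECONDITION & SPEC =====
def Spec_part2 (games : List (Int × List (List (String × Int)))) (out : Int) : Prop := out = part2_alt games
instance (games : List (Int × List (List (String × Int)))) (out : Int) : Decidable (Spec_part2 games out) := by unfold Spec_part2; infer_instance

-- ===== CLAIM (what is proved, stated in full; the proofs are below) =====
def Claim_equal_part2 : Prop := ∀ (games : List (Int × List (List (String × Int)))), Dom_part2 games → Spec_part2 games (part2 games)

-- ===== LEMMAS AND PROOFS =====

-- A's inner items-loop, observed at one color c.
theorem pv_inner_getD (l : List (String × Int)) (d : PySem.Dict String Int) (c : String) :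
    (l.foldl (fun d cq => d.insert cq.1 (max (d.getD cq.1 0) cq.2)) d).getD c 0
      = l.foldl (fun m cq => if cq.1 = c then max m cq.2 else m) (d.getD c 0) := by
  induction l generalizing d with
  | nil => rfl
  | cons p rest ih =>
      simp only [List.foldl_cons]
      rw [ih]
      rw [PySem.Dict.getD_insert]
      by_cases h : p.1 = c
      · subst h; simp
      · simp [h, Ne.symm h]

-- A color absent from l leaves the max-accumulator unchanged.
theorem pv_spec_not_mem (l : List (String × Int)) (c : String) (m : Int)
    (h : c ∉ l.map Prod.fst) :
    l.foldl (fun m cq => if cq.1 = c then max m cq.2 else m) m = m := by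
  induction l generalizing m with
  | nil => rfl
  | cons p rest ih =>
      simp only [List.map_cons, List.mem_cons] at h
      rw [not_or] at h
      simp only [List.foldl_cons, if_neg (Ne.symm h.1)]
      exact ih m h.2

-- With distinct keys, the accumulator over a dict's items is a single max with its lookup.
theorem pv_spec_items (l : List (String × Int)) (hn : (l.map Prod.fst).Nodup) (m : Int) (c : String) :
    l.foldl (fun m cq => if cq.1 = c then max m cq.2 else m) m
      = if (PySem.Dict.mk l).contains c then max m ((PySem.Dict.mk l).getD c 0) else m := by
  induction l generalizing m with
  | nil => simp [PySem.Dict.contains_mk]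
  | cons p rest ih =>
      obtain ⟨k, v⟩ := p
      simp only [List.map_cons, List.nodup_cons] at hn
      simp only [List.foldl_cons]
      by_cases h : k = c
      · have hc : c ∉ rest.map Prod.fst := h ▸ hn.1
        have hb : (k == c) = true := by simp [h]
        rw [if_pos h, pv_spec_not_mem rest c _ hc]
        simp [PySem.Dict.contains_mk, PySem.Dict.getD_eq_get?_getD, PySem.Dict.get?_mk_cons, hb]
      · rw [ih hn.2]
        have hb : (k == c) = false := by simp [h]
        simp [PySem.Dict.contains_mk, PySem.Dict.getD_eq_get?_getD, PySem.Dict.get?_mk_cons, hb, h]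
        simp only [hb, Bool.false_or]
        rfl

-- A dict's getD at an absent key is 0, so 'if contains then max …' collapses to a plain max
-- once the accumulator is nonnegative.
theorem pv_step_eq (h : PySem.Dict String Int) (m : Int) (hm : 0 ≤ m) (c : String) :
    (if h.contains c then max m (h.getD c 0) else m) = max m (h.getD c 0) := by
  by_cases hc : h.contains c
  · simp [hc]
  · have h0 : h.getD c 0 = 0 := PySem.Dict.getD_of_not_contains h 0 (by simpa using hc)
    simp [hc, h0, max_eq_left hm]

-- Per-color value of A's running-max dict equals B's per-color scan.
theorem pv_outer_getD (hs : List (List (String × Int))) (d : PySem.Dict String Int)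
    (c : String) (hd : 0 ≤ d.getD c 0) :
    (hs.foldl (fun d hand =>
        (PySem.Dict.ofList hand).items.foldl
          (fun d cq => d.insert cq.1 (max (d.getD cq.1 0) cq.2)) d) d).getD c 0
      = hs.foldl (fun m hand => max m ((PySem.Dict.ofList hand).getD c 0)) (d.getD c 0) := by
  induction hs generalizing d with
  | nil => rfl
  | cons hand rest ih =>
      simp only [List.foldl_cons]
      set h := PySem.Dict.ofList hand with hh
      have hkeys : (h.items.map Prod.fst).Nodup := PySem.Dict.nodup_keys_ofList hand
      have hstep : (h.items.foldl (fun d cq => d.insert cq.1 (max (d.getD cq.1 0) cq.2)) d).getD c 0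
          = max (d.getD c 0) (h.getD c 0) := by
        rw [pv_inner_getD, pv_spec_items h.items hkeys _ c]
        exact pv_step_eq h _ hd c
      rw [ih _ (by rw [hstep]; exact le_trans hd (le_max_left _ _)), hstep]

-- Keys of A's running-max dict = B's collected color list (both are the ordered union).
theorem pv_keys_eq (hs : List (List (String × Int))) (d : PySem.Dict String Int) :
    (hs.foldl (fun d hand =>
        (PySem.Dict.ofList hand).items.foldl
          (fun d cq => d.insert cq.1 (max (d.getD cq.1 0) cq.2)) d) d).keys
      = hs.foldl (fun s hand => (PySem.Dict.ofList hand).keys.foldl (fun s c => PySem.Set.add s c) s) d.keys := by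
  induction hs generalizing d with
  | nil => rfl
  | cons hand rest ih =>
      simp only [List.foldl_cons]
      rw [ih]
      congr 1
      have := PySem.Dict.keys_foldl_insert_key (ν := Int)
        (PySem.Dict.ofList hand).items (fun cq => cq.1)
        (fun d cq => max (d.getD cq.1 0) cq.2) d
      simpa [PySem.Set.update, PySem.Dict.keys] using this

-- Keys of A's running-max dict stay distinct.
theorem pv_keys_nodup (hs : List (List (String × Int))) (d : PySem.Dict String Int)
    (hd : d.keys.Nodup) :
    (hs.foldl (fun d hand =>
        (PySem.Dict.ofList hand).items.foldl
          (fun d cq => d.insert cq.1 (max (d.getD cq.1 0) cq.2)) d) d).keys.Nodup := by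
  induction hs generalizing d with
  | nil => exact hd
  | cons hand rest ih =>
      simp only [List.foldl_cons]
      exact ih _ (PySem.Dict.nodup_keys_foldl_insert_key _ _ _ _ hd)

-- Per-game: A's power equals B's power.
theorem pv_power_eq (hands : List (List (String × Int))) :
    part2PowerA hands = part2PowerB hands := by
  unfold part2PowerA part2PowerB
  simp only []
  set M := hands.foldl
      (fun d hand =>
        (PySem.Dict.ofList hand).items.foldl
          (fun d cq => d.insert cq.1 (max (d.getD cq.1 0) cq.2)) d)
      PySem.Dict.empty with hM
  have hnd : M.keys.Nodup := pv_keys_nodup hands _ (by simp [PySem.Dict.keys_empty])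
  rw [PySem.Dict.values_eq_map_keys M hnd 0, List.foldl_map]
  have hkeys : M.keys = hands.foldl
      (fun s hand => (PySem.Dict.ofList hand).keys.foldl (fun s c => PySem.Set.add s c) s) [] := by
    simpa [PySem.Dict.keys_empty] using pv_keys_eq hands PySem.Dict.empty
  have hcols : (hands.map PySem.Dict.ofList).foldl
      (fun s h => h.keys.foldl (fun s c => PySem.Set.add s c) s) ([] : List String)
      = M.keys := by
    rw [List.foldl_map, hkeys]
  rw [hcols]
  apply PySem.List.foldl_congr_mem
  intro p c _
  congr 1
  have := pv_outer_getD hands PySem.Dict.empty c (by simp [PySem.Dict.getD_empty])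
  simp only [PySem.Dict.getD_empty] at this
  rw [← hM] at this
  rw [this]
  unfold part2NeedB
  rw [List.foldl_map]

-- ===== VERDICT (by name: the statement is the Claim_ definition above) =====
theorem part2_spec : Claim_equal_part2 := by
  intro games _
  unfold Spec_part2 part2 part2_alt
  congr 1
  funext s hands
  rw [pv_power_eq]
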